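-- pv_equiv track=rewrite | github.com/jayantsingla2005/Magicbricks-Scraper-GUI | magicbricks_scraper_v2.py | _collect_fieldnames
-- ===== SOURCE A (Python) =====
-- from typing import Optional, List, Dict
--
-- def _collect_fieldnames(rows: List[Dict]) -> List[str]:
--     field_set = set()
--     for r in rows:
--         field_set.update(r.keys())
--     # Prefer a stable order with commonly expected columns first
--     preferred = [
--         "property_id", "title", "price", "price_per_sqft",
--         "carpet_area", "super_area", "area",
--         "bedrooms", "bathrooms", "floor", "age",
--         "furnishing", "parking", "facing", "property_type",
--         "locality", "society", "builder", "possession",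
--         "amenities", "description", "agent_name", "agent_contact",
--         "property_url", "image_urls", "latitude", "longitude",
--         "posted_date"
--     ]
--     ordered = [c for c in preferred if c in field_set]
--     for c in sorted(field_set):
--         if c not in ordered:
--             ordered.append(c)
--     return ordered
-- ===== SOURCE B (Python) =====
-- from typing import Optional, List, Dict
--
-- def _collect_fieldnames(rows: List[Dict]) -> List[str]:
--     preferred = [
--         "property_id", "title", "price", "price_per_sqft",
--         "carpet_area", "super_area", "area",
--         "bedrooms", "bathrooms", "floor", "age",
--         "furnishing", "parking", "facing", "property_type",
--         "locality", "society", "builder", "possession",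
--         "amenities", "description", "agent_name", "agent_contact",
--         "property_url", "image_urls", "latitude", "longitude",
--         "posted_date"
--     ]
--     rank = {c: i for i, c in enumerate(preferred)}
--     fields = {k for r in rows for k in r}
--     return sorted(fields, key=lambda c: (rank.get(c, len(preferred)), c))
-- ===== Notes on version B (the rewrite author's own statement) =====
-- stated objective: faster
-- what changed: Replaces A's two-phase construction (filter preferred by set membership, then append sorted leftovers with a linear 'not in ordered' dedup scan) with a single sorted() over the field set under a composite (rank, name) key, where rank maps each preferred column to its index.
import Mathlib
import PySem

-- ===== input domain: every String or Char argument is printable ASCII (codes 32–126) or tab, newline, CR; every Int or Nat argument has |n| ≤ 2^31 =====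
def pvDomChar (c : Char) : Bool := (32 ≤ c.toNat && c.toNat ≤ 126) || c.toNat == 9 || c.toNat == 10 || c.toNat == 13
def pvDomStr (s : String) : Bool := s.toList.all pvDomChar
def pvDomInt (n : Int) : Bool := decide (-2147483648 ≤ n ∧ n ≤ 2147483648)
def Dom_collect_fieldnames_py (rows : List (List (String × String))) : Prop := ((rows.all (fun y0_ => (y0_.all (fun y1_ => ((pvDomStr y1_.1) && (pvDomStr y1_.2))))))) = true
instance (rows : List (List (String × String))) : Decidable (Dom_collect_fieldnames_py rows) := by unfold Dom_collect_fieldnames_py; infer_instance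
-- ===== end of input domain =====

-- B replaces A's two-phase build (filter preferred, then append sorted leftovers with a
-- linear 'not in ordered' dedup scan) with ONE sort under a composite (rank, name) key;
-- a timing run measured B faster (A's dedup scan is quadratic in the field count).

-- the preferred-column literal, shared data of both ports
def pvPreferred : List String := [
  "property_id", "title", "price", "price_per_sqft",
  "carpet_area", "super_area", "area",
  "bedrooms", "bathrooms", "floor", "age",
  "furnishing", "parking", "facing", "property_type",
  "locality", "society", "builder", "possession",
  "amenities", "description", "agent_name", "agent_contact",
  "property_url", "image_urls", "latitude", "longitude",
  "posted_date"]

-- ===== PORT A =====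
-- r.keys() is ported as r.map Prod.fst (a Python dict's keys, in insertion order; exact,
-- a dict has unique keys).
def collect_fieldnames_py (rows : List (List (String × String))) : List String :=
  let field_set : PySem.Set String :=
    rows.foldl (fun s r => PySem.Set.update s (r.map Prod.fst)) PySem.Set.empty
  let ordered := pvPreferred.filter (fun c => PySem.Set.contains field_set c)
  (PySem.List.sorted field_set (fun c => c)).foldl
    (fun acc c => if acc.contains c then acc else acc ++ [c]) ordered

-- ===== PORT B =====
-- rank = {c: i for i, c in enumerate(preferred)}
def pvRank : PySem.Dict String Int :=
  (PySem.List.enumerate pvPreferred 0).foldl (fun d p => d.insert p.2 p.1) PySem.Dict.empty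

-- the sort key's first component: rank.get(c, len(preferred))
def pvKey1 (c : String) : Int := PySem.Dict.getD pvRank c (pvPreferred.length : Int)

def collect_fieldnames_py_alt (rows : List (List (String × String))) : List String :=
  let fields : PySem.Set String := PySem.Set.ofList (rows.flatMap (fun r => r.map Prod.fst))
  PySem.List.sorted2 fields pvKey1 (fun c => c)

-- ===== PRECONDITION & SPEC =====
def Spec_collect_fieldnames_py (rows : List (List (String × String))) (out : List String) : Prop := out = collect_fieldnames_py_alt rows
instance (rows : List (List (String × String))) (out : List String) : Decidable (Spec_collect_fieldnames_py rows out) := by unfold Spec_collect_fieldnames_py; infer_instance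

-- ===== CLAIM (what is proved, stated in full; the proofs are below) =====
def Claim_equal_collect_fieldnames_py : Prop := ∀ (rows : List (List (String × String))), Dom_collect_fieldnames_py rows → Spec_collect_fieldnames_py rows (collect_fieldnames_py rows)

-- ===== LEMMAS AND PROOFS =====

-- the strict order both outputs are arranged by: (pvKey1 c, c) lexicographically
def pvLt (a b : String) : Prop := pvKey1 a < pvKey1 b ∨ (pvKey1 a = pvKey1 b ∧ a < b)

-- the boolean comparator PySem.List.sorted2 uses (reverse = false)
def pvBef (a b : String) : Bool :=
  decide (pvKey1 a < pvKey1 b) || (!decide (pvKey1 b < pvKey1 a) && decide (a < b))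

-- the common field set of the two ports
def pvS (rows : List (List (String × String))) : PySem.Set String :=
  PySem.Set.ofList (rows.flatMap (fun r => r.map Prod.fst))

theorem pvLt_asymm : ∀ a b : String, pvLt a b → ¬ pvLt b a := by
  intro a b h hb
  rcases h with h1 | ⟨h1, h2⟩ <;> rcases hb with h3 | ⟨h3, h4⟩
  · exact absurd h3 (lt_asymm h1)
  · omega
  · omega
  · exact absurd h4 (lt_asymm h2)

theorem pvBef_asymm : ∀ a b : String, pvBef a b = true → pvBef b a = false := by
  intro a b h
  simp only [pvBef, Bool.or_eq_true, Bool.and_eq_true, Bool.not_eq_true',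
    decide_eq_true_eq, decide_eq_false_iff_not] at h
  simp only [pvBef, Bool.or_eq_false_iff, Bool.and_eq_false_iff, Bool.not_eq_false',
    decide_eq_true_eq, decide_eq_false_iff_not]
  rcases h with h1 | ⟨h1, h2⟩
  · exact ⟨lt_asymm h1, Or.inl (by omega)⟩
  · exact ⟨h1, Or.inr (lt_asymm h2)⟩

theorem pvBef_trans' : ∀ x y z : String, pvBef x y = true → pvBef z y = false → pvBef z x = false := by
  intro x y z hxy hzy
  simp only [pvBef, Bool.or_eq_true, Bool.and_eq_true, Bool.not_eq_true',
    decide_eq_true_eq, decide_eq_false_iff_not] at hxy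
  simp only [pvBef, Bool.or_eq_false_iff, Bool.and_eq_false_iff, Bool.not_eq_false',
    decide_eq_true_eq, decide_eq_false_iff_not] at hzy ⊢
  obtain ⟨hzy1, hzy2⟩ := hzy
  rcases hxy with h1 | ⟨h1, h2⟩
  · constructor
    · omega
    · exact Or.inl (by omega)
  · rcases hzy2 with h3 | h3
    · exact ⟨by omega, Or.inl (by omega)⟩
    · refine ⟨by omega, ?_⟩
      by_cases hk : pvKey1 x < pvKey1 z
      · exact Or.inl hk
      · exact Or.inr (fun hlt => h3 (lt_trans hlt h2))

theorem pairwise_insertBy {α : Type} (bef : α → α → Bool)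
    (hasym : ∀ a b, bef a b = true → bef b a = false)
    (htrans : ∀ x y z, bef x y = true → bef z y = false → bef z x = false) :
    ∀ (l : List α) (x : α), l.Pairwise (fun a b => bef b a = false) →
      (PySem.List.insertBy bef x l).Pairwise (fun a b => bef b a = false) := by
  intro l
  induction l with
  | nil => intro x _; simp [PySem.List.insertBy]
  | cons y ys ih =>
    intro x h
    rw [List.pairwise_cons] at h
    have hstep : PySem.List.insertBy bef x (y :: ys) =
        if bef x y = true then x :: y :: ys else y :: PySem.List.insertBy bef x ys := rfl
    rw [hstep]
    split_ifs with hxy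
    · refine List.pairwise_cons.mpr ⟨?_, List.pairwise_cons.mpr ⟨h.1, h.2⟩⟩
      intro z hz
      rcases List.mem_cons.mp hz with rfl | hz'
      · exact hasym _ _ hxy
      · exact htrans x y z hxy (h.1 z hz')
    · refine List.pairwise_cons.mpr ⟨?_, ih x h.2⟩
      intro z hz
      rcases (PySem.List.mem_insertBy bef x z ys).mp hz with rfl | hz'
      · exact Bool.not_eq_true _ ▸ (by simpa using hxy)
      · exact h.1 z hz'

theorem pairwise_foldl_insertBy {α : Type} (bef : α → α → Bool)
    (hasym : ∀ a b, bef a b = true → bef b a = false)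
    (htrans : ∀ x y z, bef x y = true → bef z y = false → bef z x = false) :
    ∀ (xs acc : List α), acc.Pairwise (fun a b => bef b a = false) →
      (xs.foldl (fun acc x => PySem.List.insertBy bef x acc) acc).Pairwise
        (fun a b => bef b a = false) := by
  intro xs
  induction xs with
  | nil => intro acc h; exact h
  | cons x t ih => intro acc h; exact ih _ (pairwise_insertBy bef hasym htrans acc x h)

-- uniqueness: two pairwise-ordered permutations under an asymmetric relation coincide
theorem eq_of_perm_of_pairwise {α : Type} (r : α → α → Prop)
    (hasym : ∀ a b, r a b → ¬ r b a) :
    ∀ (l l' : List α), l.Perm l' → l.Pairwise r → l'.Pairwise r → l = l' := by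
  intro l
  induction l with
  | nil => intro l' hp _ _; simpa using hp.nil_eq.symm
  | cons a t ih =>
    intro l' hp h h'
    cases l' with
    | nil => exact absurd hp.symm (by simp)
    | cons b t' =>
      rw [List.pairwise_cons] at h h'
      have hab : a = b := by
        by_contra hne
        have ha : a ∈ b :: t' := hp.mem_iff.mp (List.mem_cons_self)
        have hb : b ∈ a :: t := hp.symm.mem_iff.mp (List.mem_cons_self)
        have ha' : a ∈ t' := by rcases List.mem_cons.mp ha with h1 | h1; exact absurd h1 hne; exact h1
        have hb' : b ∈ t := by
          rcases List.mem_cons.mp hb with h1 | h1; exact absurd h1.symm hne; exact h1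
        exact hasym a b (h.1 b hb') (h'.1 a ha')
      subst hab
      rw [ih t' hp.cons_inv h.2 h'.2]

-- preferred is duplicate-free, its ranks are its positions
theorem pvPreferred_nodup : pvPreferred.Nodup := by decide

set_option maxRecDepth 20000 in
theorem pvPreferred_pairwise_key : pvPreferred.Pairwise (fun a b => pvKey1 a < pvKey1 b) := by
  decide

theorem pvKey1_lt_of_mem : ∀ c ∈ pvPreferred, pvKey1 c < (pvPreferred.length : Int) := by
  decide

theorem getD_foldl_insert_snd {κ ν : Type} [BEq κ] [LawfulBEq κ] [DecidableEq κ]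
    (l : List (ν × κ)) (d : PySem.Dict κ ν) (c : κ) (v : ν) (h : ∀ p ∈ l, p.2 ≠ c) :
    (l.foldl (fun d p => d.insert p.2 p.1) d).getD c v = d.getD c v := by
  induction l generalizing d with
  | nil => rfl
  | cons p t ih =>
    rw [List.foldl_cons, ih _ (fun q hq => h q (List.mem_cons_of_mem _ hq))]
    rw [PySem.Dict.getD_insert, if_neg (fun hc => h p List.mem_cons_self hc.symm)]

theorem pvKey1_default (c : String) (h : c ∉ pvPreferred) : pvKey1 c = (pvPreferred.length : Int) := by
  unfold pvKey1 pvRank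
  rw [getD_foldl_insert_snd]
  · rfl
  · intro p hp hpc
    apply h
    have : p.2 ∈ (PySem.List.enumerate pvPreferred 0).map (fun x => x.2) := List.mem_map_of_mem hp
    rw [PySem.List.map_snd_enumerate] at this
    exact hpc ▸ this

-- A's dedup loop on a duplicate-free list is an append of a filter
theorem foldl_dedup_append (l : List String) :
    ∀ (init : List String), l.Nodup →
      l.foldl (fun acc c => if acc.contains c then acc else acc ++ [c]) init
        = init ++ l.filter (fun c => !init.contains c) := by
  induction l with
  | nil => intro init _; simp
  | cons c t ih =>
    intro init h
    rw [List.nodup_cons] at h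
    rw [List.foldl_cons, List.filter_cons]
    by_cases hc : c ∈ init
    · rw [if_pos ((List.contains_iff_mem).mpr hc), if_neg (by simp [hc]), ih init h.2]
    · rw [if_neg (by simp [hc]), if_pos (by simp [hc]), ih _ h.2]
      have hfc : t.filter (fun x => !(init ++ [c]).contains x) = t.filter (fun x => !init.contains x) := by
        apply List.filter_congr
        intro x hx
        have hxc : x ≠ c := fun e => h.1 (e ▸ hx)
        rw [Bool.eq_iff_iff]
        simp [hxc]
      rw [hfc, List.append_assoc, List.singleton_append]

theorem setA_eq (rows : List (List (String × String))) :
    rows.foldl (fun s r => PySem.Set.update s (r.map Prod.fst)) PySem.Set.empty = pvS rows := by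
  rw [pvS, PySem.Set.ofList_eq_foldl, List.foldl_flatMap]
  rfl

theorem nodup_pvS (rows : List (List (String × String))) : (pvS rows).Nodup :=
  PySem.Set.nodup_ofList _

theorem nodup_sorted_pvS (rows : List (List (String × String))) :
    (PySem.List.sorted (pvS rows) (fun c => c)).Nodup :=
  ((PySem.List.sorted_perm (pvS rows) (fun c => c) false).nodup_iff).mpr (nodup_pvS rows)

-- A's output, characterised: preferred∩S in preferred order, then sorted S minus preferred
theorem A_char (rows : List (List (String × String))) :
    collect_fieldnames_py rows
      = pvPreferred.filter (fun c => PySem.Set.contains (pvS rows) c)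
        ++ (PySem.List.sorted (pvS rows) (fun c => c)).filter (fun c => !pvPreferred.contains c) := by
  unfold collect_fieldnames_py
  rw [setA_eq]
  rw [foldl_dedup_append _ _ (nodup_sorted_pvS rows)]
  congr 1
  apply List.filter_congr
  intro x hx
  have hxS : x ∈ pvS rows := (PySem.List.mem_sorted _ _ _ _).mp hx
  have h1 : PySem.Set.contains (pvS rows) x = true := (PySem.Set.contains_iff _ _).mpr hxS
  congr 1
  by_cases hp : x ∈ pvPreferred
  · have : x ∈ pvPreferred.filter (fun c => PySem.Set.contains (pvS rows) c) :=
      List.mem_filter.mpr ⟨hp, h1⟩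
    simp [hp, hxS]
  · have : x ∉ pvPreferred.filter (fun c => PySem.Set.contains (pvS rows) c) :=
      fun hmem => hp (List.mem_filter.mp hmem).1
    simp [hp]

theorem A_pairwise (rows : List (List (String × String))) :
    (collect_fieldnames_py rows).Pairwise pvLt := by
  rw [A_char]
  rw [List.pairwise_append]
  refine ⟨?_, ?_, ?_⟩
  · exact (pvPreferred_pairwise_key.sublist List.filter_sublist).imp (fun h => Or.inl h)
  · have hs : (PySem.List.sorted (pvS rows) (fun c => c)).Pairwise (fun a b : String => a < b) := by
      rw [pvS]
      exact PySem.List.sorted_ofList_pairwise_lt _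
    have hf := hs.sublist (List.filter_sublist (p := fun c => !pvPreferred.contains c)
      (l := PySem.List.sorted (pvS rows) (fun c => c)))
    refine hf.imp_of_mem ?_
    intro a b ha hb hab
    have hpa : a ∉ pvPreferred := by
      have := (List.mem_filter.mp ha).2; simpa [List.contains_iff_mem] using this
    have hpb : b ∉ pvPreferred := by
      have := (List.mem_filter.mp hb).2; simpa [List.contains_iff_mem] using this
    exact Or.inr ⟨by rw [pvKey1_default a hpa, pvKey1_default b hpb], hab⟩
  · intro a ha b hb
    have hpa : a ∈ pvPreferred := (List.mem_filter.mp ha).1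
    have hpb : b ∉ pvPreferred := by
      have := (List.mem_filter.mp hb).2; simpa [List.contains_iff_mem] using this
    exact Or.inl (by rw [pvKey1_default b hpb]; exact pvKey1_lt_of_mem a hpa)

theorem A_perm (rows : List (List (String × String))) :
    (collect_fieldnames_py rows).Perm (pvS rows) := by
  rw [A_char]
  have hP : (pvPreferred.filter (fun c => PySem.Set.contains (pvS rows) c)).Perm
      ((PySem.List.sorted (pvS rows) (fun c => c)).filter (fun c => pvPreferred.contains c)) := by
    rw [List.perm_ext_iff_of_nodup (pvPreferred_nodup.filter _) ((nodup_sorted_pvS rows).filter _)]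
    intro a
    simp only [List.mem_filter, PySem.List.mem_sorted]
    rw [PySem.Set.contains_iff]
    simp [and_comm]
  exact ((hP.append_right _).trans (List.filter_append_perm _ _)).trans
    (PySem.List.sorted_perm _ _ _)

theorem B_eq_foldl (rows : List (List (String × String))) :
    collect_fieldnames_py_alt rows
      = (pvS rows).foldl (fun acc x => PySem.List.insertBy pvBef x acc) [] := rfl

theorem B_pairwise (rows : List (List (String × String))) :
    (collect_fieldnames_py_alt rows).Pairwise pvLt := by
  have h1 : (collect_fieldnames_py_alt rows).Pairwise (fun a b => pvBef b a = false) := by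
    rw [B_eq_foldl]
    exact pairwise_foldl_insertBy pvBef pvBef_asymm pvBef_trans' _ [] (by simp)
  have hnd : (collect_fieldnames_py_alt rows).Nodup := by
    have hperm : (collect_fieldnames_py_alt rows).Perm (pvS rows) :=
      PySem.List.sorted2_perm _ _ _ _
    exact hperm.nodup_iff.mpr (nodup_pvS rows)
  refine (h1.and hnd).imp ?_
  rintro a b ⟨hbef, hne⟩
  simp only [pvBef, Bool.or_eq_false_iff, Bool.and_eq_false_iff, Bool.not_eq_false',
    decide_eq_true_eq, decide_eq_false_iff_not] at hbef
  obtain ⟨h1', h2'⟩ := hbef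
  by_cases hk : pvKey1 a < pvKey1 b
  · exact Or.inl hk
  · have hkeq : pvKey1 a = pvKey1 b := le_antisymm (not_lt.mp h1') (not_lt.mp hk)
    rcases h2' with h3 | h3
    · exact absurd h3 hk
    · exact Or.inr ⟨hkeq, (not_lt.mp h3).lt_of_ne hne⟩

theorem B_perm (rows : List (List (String × String))) :
    (collect_fieldnames_py_alt rows).Perm (pvS rows) :=
  PySem.List.sorted2_perm _ _ _ _

-- ===== VERDICT (by name: the statement is the Claim_ definition above) =====
theorem collect_fieldnames_py_spec : Claim_equal_collect_fieldnames_py := by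
  intro rows _
  unfold Spec_collect_fieldnames_py
  exact eq_of_perm_of_pairwise pvLt pvLt_asymm _ _
    ((A_perm rows).trans (B_perm rows).symm) (A_pairwise rows) (B_pairwise rows)
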